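-- pv_equiv track=rewrite | github.com/alfredronning/knowit_kalender | 2022/day17/solver.py | finn_antall_kombinasjoner
-- ===== SOURCE A (Python) =====
-- def finn_antall_kombinasjoner(hakk):
--     if hakk == 0:
--         return 0
--     if hakk == 1:
--         return 8
--     kombinasjoner = [1]*10
--     for i in range(hakk-1):
--         kombinasjoner_tmp = []
--         max_dybde_for_hakk = 8 if i == hakk-2 else 9 if i == hakk-3 else 10
--         max_dybde_forrige = 9 if i == hakk-2 else 10
--         for j in range(max_dybde_for_hakk):
--             min_dybde = max(0, j-5)
--             max_dybde = min(max_dybde_forrige, j+6)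
--             kombinasjoner_tmp.append(sum(kombinasjoner[dybde] for dybde in range(min_dybde, max_dybde)))
--         kombinasjoner = kombinasjoner_tmp
--     return sum(kombinasjoner)
-- ===== SOURCE B (Python) =====
-- def finn_antall_kombinasjoner(hakk):
--     if hakk == 0:
--         return 0
--     if hakk == 1:
--         return 8
--     v = [1] * 10
--     for step in range(hakk - 1, 0, -1):  # step = remaining transitions, counted down
--         width = 8 if step == 1 else 9 if step == 2 else 10
--         cap = min(len(v), 9 if step == 1 else 10)
--         s = sum(v[0:min(cap, 6)])  # window sum for j = 0
--         out = []
--         for j in range(width):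
--             out.append(s)
--             # slide the window [max(0, j-5), min(cap, j+6)) one step right
--             if j + 6 < cap:
--                 s += v[j + 6]
--             if j - 5 >= 0:
--                 s -= v[j - 5]
--         v = out
--     return sum(v)
-- ===== Notes on version B (the rewrite author's own statement) =====
-- stated objective: faster
-- what changed: B replaces A's per-window re-summation (an inner generator over each slice) by a sliding-window running sum updated in constant time per entry, adding the element that enters the window and subtracting the one that leaves, with the outer loop counting remaining transitions downwards so the width logic no longer mentions hakk.
import Mathlib
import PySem

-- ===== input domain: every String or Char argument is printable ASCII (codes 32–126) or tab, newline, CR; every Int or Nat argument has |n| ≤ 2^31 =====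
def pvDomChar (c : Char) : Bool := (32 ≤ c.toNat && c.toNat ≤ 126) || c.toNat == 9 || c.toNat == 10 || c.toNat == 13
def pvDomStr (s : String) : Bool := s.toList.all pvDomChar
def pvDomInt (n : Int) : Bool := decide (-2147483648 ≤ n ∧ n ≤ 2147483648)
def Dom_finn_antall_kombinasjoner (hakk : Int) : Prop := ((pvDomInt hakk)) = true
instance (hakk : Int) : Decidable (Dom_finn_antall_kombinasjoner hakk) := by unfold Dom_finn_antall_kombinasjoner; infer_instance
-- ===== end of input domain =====

-- B replaces A's per-window re-summation by a sliding-window running sum updated in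
-- O(1) per entry, with the outer loop counting remaining transitions down (objective: alternative).

-- ===== PORT A =====
-- One iteration of A's outer loop: build kombinasjoner_tmp by appending, per j,
-- the sum over kombinasjoner[min_dybde:max_dybde] computed index by index.
-- (PySem.List.pyGet? ks d).getD 0 : the index d is always in range on every state this loop
-- reaches, so Python's indexing never raises and the default is never used.
def stepA (hakk i : Int) (ks : List Int) : List Int :=
  let max_dybde_for_hakk : Int := if i = hakk - 2 then 8 else if i = hakk - 3 then 9 else 10
  let max_dybde_forrige : Int := if i = hakk - 2 then 9 else 10
  (PySem.List.pyRange 0 max_dybde_for_hakk 1).foldl (fun tmp j =>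
    tmp ++ [(PySem.List.pyRange (max 0 (j - 5)) (min max_dybde_forrige (j + 6)) 1).foldl
              (fun acc d => acc + (PySem.List.pyGet? ks d).getD 0) 0]) []

def finn_antall_kombinasjoner (hakk : Int) : Int :=
  if hakk = 0 then 0
  else if hakk = 1 then 8
  else ((PySem.List.pyRange 0 (hakk - 1) 1).foldl (fun ks i => stepA hakk i ks)
          (List.replicate 10 1)).sum

-- ===== PORT B =====
-- One iteration of B's outer loop, `step` = remaining transitions (counted down to 1):
-- start from the window sum for j = 0, then slide the window one index at a time,
-- adding the entering element and subtracting the leaving one; the fold state is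
-- (out, s) = (the list built so far, the running window sum).
-- (pyGet? …).getD 0 : both reads are guarded so the index is in range and Python never raises.
def stepSlide (step : Int) (v : List Int) : List Int :=
  let width : Int := if step = 1 then 8 else if step = 2 then 9 else 10
  let cap : Int := min (v.length : Int) (if step = 1 then 9 else 10)
  let r := (PySem.List.pyRange 0 width 1).foldl
      (fun (st : List Int × Int) j =>
        let out := st.1 ++ [st.2]
        let s1 := if j + 6 < cap then st.2 + (PySem.List.pyGet? v (j + 6)).getD 0 else st.2
        let s2 := if 0 ≤ j - 5 then s1 - (PySem.List.pyGet? v (j - 5)).getD 0 else s1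
        (out, s2))
      ([], (PySem.List.slice v (some 0) (some (min cap 6))).sum)
  r.1

def finn_antall_kombinasjoner_alt (hakk : Int) : Int :=
  if hakk = 0 then 0
  else if hakk = 1 then 8
  else ((PySem.List.pyRange (hakk - 1) 0 (-1)).foldl (fun v step => stepSlide step v)
          (List.replicate 10 1)).sum

-- ===== PRECONDITION & SPEC =====
def Spec_finn_antall_kombinasjoner (hakk : Int) (out : Int) : Prop := out = finn_antall_kombinasjoner_alt hakk
instance (hakk : Int) (out : Int) : Decidable (Spec_finn_antall_kombinasjoner hakk out) := by unfold Spec_finn_antall_kombinasjoner; infer_instance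

-- ===== CLAIM (what is proved, stated in full; the proofs are below) =====
def Claim_equal_finn_antall_kombinasjoner : Prop := ∀ (hakk : Int), Dom_finn_antall_kombinasjoner hakk → Spec_finn_antall_kombinasjoner hakk (finn_antall_kombinasjoner hakk)

-- ===== LEMMAS AND PROOFS =====

-- the sum of v over the window [j-5, min cap (j+6)) (Nat subtraction clamps at 0)
def wsum (cap : Nat) (v : List Int) (j : Nat) : Int :=
  ∑ d ∈ Finset.Ico (j - 5) (min cap (j + 6)), v.getD d 0

theorem sum_take (v : List Int) (m : Nat) :
    (v.take m).sum = ∑ d ∈ Finset.range m, v.getD d 0 := by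
  induction m with
  | zero => simp
  | succ m ih =>
    by_cases h : m < v.length
    · have ht : v.take (m + 1) = v.take m ++ [v[m]] := by
        rw [List.take_add_one, List.getElem?_eq_getElem h]; rfl
      rw [ht, List.sum_append, Finset.sum_range_succ, ← ih,
          List.getD_eq_getElem?_getD, List.getElem?_eq_getElem h]
      simp
    · rw [List.take_of_length_le (by omega), Finset.sum_range_succ, ← ih,
          List.take_of_length_le (by omega),
          List.getD_eq_getElem?_getD, List.getElem?_eq_none (by omega)]
      simp

theorem sum_map_range (n : Nat) (f : Nat → Int) :
    ((List.range n).map f).sum = ∑ i ∈ Finset.range n, f i := by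
  induction n with
  | zero => simp
  | succ n ih =>
    rw [List.range_succ, Finset.sum_range_succ, List.map_append, List.sum_append, ih]; simp

theorem foldA_sum (v : List Int) (a b : Int) (h0 : 0 ≤ a) :
    (PySem.List.pyRange a b 1).foldl (fun acc d => acc + (PySem.List.pyGet? v d).getD 0) 0
    = ∑ d ∈ Finset.Ico a.toNat b.toNat, v.getD d 0 := by
  rw [PySem.List.foldl_add, PySem.List.pyRange_one, List.map_map, zero_add]
  have hmap : ((List.range (b - a).toNat).map
      ((fun d => (PySem.List.pyGet? v d).getD 0) ∘ fun k : Nat => a + (k : Int)))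
      = (List.range (b - a).toNat).map (fun k => v.getD (a.toNat + k) 0) := by
    refine List.map_congr_left (fun k _ => ?_)
    simp only [Function.comp_apply]
    rw [show a + (k : Int) = ((a.toNat + k : Nat) : Int) by omega, PySem.List.pyGet?_natCast,
        List.getD_eq_getElem?_getD]
  rw [hmap, sum_map_range, Finset.sum_Ico_eq_sum_range,
      show b.toNat - a.toNat = (b - a).toNat by omega]

-- A's step, as a map of window sums
theorem stepA_map (hakk i : Int) (v : List Int)
    (hP : (if i = hakk - 2 then (9 : Int) else 10) ≤ (v.length : Int)) :
    stepA hakk i v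
    = (PySem.List.pyRange 0 (if i = hakk - 2 then 8 else if i = hakk - 3 then 9 else 10) 1).map
        (fun j => wsum (if i = hakk - 2 then 9 else 10) v j.toNat) := by
  simp only [stepA]
  rw [PySem.List.foldl_append_singleton_eq_map, List.nil_append]
  refine List.map_congr_left (fun j hj => ?_)
  rw [PySem.List.mem_pyRange_one] at hj
  rw [foldA_sum v _ _ (by omega)]
  unfold wsum
  split_ifs at hP hj ⊢ <;>
    exact Finset.sum_congr (by ext x; simp only [Finset.mem_Ico]; try omega) (fun x _ => rfl)

-- one slide of the window: from the sum at j to the sum at j + 1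
theorem wsum_succ (cap : Nat) (v : List Int) (n : Nat) (h9 : 9 ≤ cap) (hn : n < 10) :
    (if 5 ≤ n then (if n + 6 < cap then wsum cap v n + v.getD (n + 6) 0 else wsum cap v n) - v.getD (n - 5) 0
     else (if n + 6 < cap then wsum cap v n + v.getD (n + 6) 0 else wsum cap v n))
    = wsum cap v (n + 1) := by
  unfold wsum
  have htop : (if n + 6 < cap then (∑ d ∈ Finset.Ico (n - 5) (min cap (n + 6)), v.getD d 0) + v.getD (n + 6) 0
      else ∑ d ∈ Finset.Ico (n - 5) (min cap (n + 6)), v.getD d 0)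
      = ∑ d ∈ Finset.Ico (n - 5) (min cap (n + 7)), v.getD d 0 := by
    split_ifs with h
    · rw [show min cap (n + 6) = n + 6 by omega, show min cap (n + 7) = n + 7 by omega,
          ← Finset.sum_Ico_consecutive _ (by omega : n - 5 ≤ n + 6) (by omega : n + 6 ≤ n + 7),
          show Finset.Ico (n + 6) (n + 7) = {n + 6} by ext x; simp; try omega, Finset.sum_singleton]
    · rw [show min cap (n + 6) = cap by omega, show min cap (n + 7) = cap by omega]
  rw [htop]
  split_ifs with h5
  · rw [Finset.sum_eq_sum_Ico_succ_bot (by omega : n - 5 < min cap (n + 7)),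
        show n - 5 + 1 = n + 1 - 5 by omega]
    ring
  · rw [show n + 1 - 5 = n - 5 by omega]

-- the inner fold of B's step produces exactly the window sums
theorem slide_fold (cap : Nat) (v : List Int) (h9 : 9 ≤ cap) (n : Nat) (hn : n ≤ 10) :
    (PySem.List.pyRange 0 (n : Int) 1).foldl
      (fun (st : List Int × Int) j =>
        (st.1 ++ [st.2],
         if 0 ≤ j - 5 then
           (if j + 6 < (cap : Int) then st.2 + (PySem.List.pyGet? v (j + 6)).getD 0 else st.2)
             - (PySem.List.pyGet? v (j - 5)).getD 0
         else
           (if j + 6 < (cap : Int) then st.2 + (PySem.List.pyGet? v (j + 6)).getD 0 else st.2)))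
      ([], wsum cap v 0)
    = ((List.range n).map (fun k => wsum cap v k), wsum cap v n) := by
  induction n with
  | zero => rw [PySem.List.pyRange_one_eq_nil (by norm_num)]; simp
  | succ n ih =>
    rw [show ((n + 1 : Nat) : Int) = (n : Int) + 1 by push_cast; ring,
        PySem.List.pyRange_one_succ_right (by positivity), List.foldl_append,
        ih (by omega), List.range_succ]
    simp only [List.foldl_cons, List.foldl_nil]
    refine Prod.ext (by simp) ?_
    show (if 0 ≤ (n : Int) - 5 then
           (if (n : Int) + 6 < (cap : Int) then wsum cap v n + (PySem.List.pyGet? v ((n : Int) + 6)).getD 0 else wsum cap v n)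
             - (PySem.List.pyGet? v ((n : Int) - 5)).getD 0
         else
           (if (n : Int) + 6 < (cap : Int) then wsum cap v n + (PySem.List.pyGet? v ((n : Int) + 6)).getD 0 else wsum cap v n))
        = wsum cap v (n + 1)
    rw [← wsum_succ cap v n h9 (by omega)]
    have e1 : PySem.List.pyGet? v ((n : Int) + 6) = v[n + 6]? := by
      rw [show (n : Int) + 6 = ((n + 6 : Nat) : Int) by push_cast; ring, PySem.List.pyGet?_natCast]
    by_cases hb : 5 ≤ n
    · have e2 : PySem.List.pyGet? v ((n : Int) - 5) = v[n - 5]? := by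
        rw [show (n : Int) - 5 = ((n - 5 : Nat) : Int) by omega, PySem.List.pyGet?_natCast]
      by_cases hc : n + 6 < cap
      · simp only [if_pos (show (0 : Int) ≤ (n : Int) - 5 by omega),
          if_pos (show (n : Int) + 6 < (cap : Int) by omega), if_pos hb, if_pos hc,
          e1, e2, List.getD_eq_getElem?_getD]
      · simp only [if_pos (show (0 : Int) ≤ (n : Int) - 5 by omega),
          if_neg (show ¬((n : Int) + 6 < (cap : Int)) by omega), if_pos hb, if_neg hc,
          e2, List.getD_eq_getElem?_getD]
    · by_cases hc : n + 6 < cap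
      · simp only [if_neg (show ¬((0 : Int) ≤ (n : Int) - 5) by omega),
          if_pos (show (n : Int) + 6 < (cap : Int) by omega), if_neg hb, if_pos hc,
          e1, List.getD_eq_getElem?_getD]
      · simp only [if_neg (show ¬((0 : Int) ≤ (n : Int) - 5) by omega),
          if_neg (show ¬((n : Int) + 6 < (cap : Int)) by omega), if_neg hb, if_neg hc]

-- the initial running sum is the window sum at j = 0
theorem slice_head_wsum (capN : Nat) (v : List Int) (h9 : 9 ≤ capN) :
    (PySem.List.slice v (some 0) (some (min ((capN : Nat) : Int) 6))).sum = wsum capN v 0 := by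
  rw [show min ((capN : Nat) : Int) 6 = 6 by omega, PySem.List.slice_zero_start,
      PySem.List.slice_to v (by norm_num), show ((6 : Int)).toNat = 6 by decide, sum_take]
  unfold wsum
  rw [show (0 : Nat) - 5 = 0 by omega, show min capN (0 + 6) = 6 by omega, Finset.range_eq_Ico]

-- the produced list is the list of window sums
theorem slide_map_eq (capN Wn : Nat) (v : List Int) :
    (List.range Wn).map (fun k => wsum capN v k)
    = (PySem.List.pyRange 0 ((Wn : Nat) : Int) 1).map (fun j => wsum capN v j.toNat) := by
  rw [PySem.List.pyRange_zero_nat, List.map_map]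
  exact List.map_congr_left (fun k _ => by simp)

-- B's step, as the same map of window sums
theorem stepSlide_map (step : Int) (v : List Int)
    (hlen : (if step = 1 then (9 : Int) else 10) ≤ (v.length : Int)) :
    stepSlide step v
    = (PySem.List.pyRange 0 (if step = 1 then 8 else if step = 2 then 9 else 10) 1).map
        (fun j => wsum (if step = 1 then 9 else 10) v j.toNat) := by
  by_cases h1 : step = 1
  · simp only [stepSlide, h1, reduceIte, Int.reduceEq]
    rw [show min ((v.length : Nat) : Int) (9 : Int) = 9 by simp only [h1] at hlen; omega,
        show (9 : Int) = ((9 : Nat) : Int) by norm_num,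
        show (8 : Int) = ((8 : Nat) : Int) by norm_num,
        slice_head_wsum 9 v (by norm_num),
        slide_fold 9 v (by norm_num) 8 (by norm_num), ← slide_map_eq 9 8 v]
  · by_cases h2 : step = 2
    · simp only [stepSlide, h2, reduceIte, Int.reduceEq]
      rw [show min ((v.length : Nat) : Int) (10 : Int) = 10 by simp only [if_neg h1] at hlen; omega,
          show (10 : Int) = ((10 : Nat) : Int) by norm_num,
          show (9 : Int) = ((9 : Nat) : Int) by norm_num,
          slice_head_wsum 10 v (by norm_num),
          slide_fold 10 v (by norm_num) 9 (by norm_num), ← slide_map_eq 10 9 v]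
    · simp only [stepSlide, if_neg h1, if_neg h2]
      rw [show min ((v.length : Nat) : Int) (10 : Int) = 10 by simp only [if_neg h1] at hlen; omega,
          show (10 : Int) = ((10 : Nat) : Int) by norm_num,
          slice_head_wsum 10 v (by norm_num),
          slide_fold 10 v (by norm_num) 10 (by norm_num), ← slide_map_eq 10 10 v]

-- per-iteration agreement: A's step at i equals B's step at the countdown value hakk-1-i
theorem stepA_eq_stepSlide (hakk i : Int) (v : List Int)
    (hP : (if i = hakk - 2 then (9 : Int) else 10) ≤ (v.length : Int)) :
    stepA hakk i v = stepSlide (hakk - 1 - i) v := by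
  rw [stepA_map hakk i v hP, stepSlide_map (hakk - 1 - i) v (by split_ifs at hP ⊢ <;> omega)]
  rw [show (if hakk - 1 - i = 1 then (8 : Int) else if hakk - 1 - i = 2 then 9 else 10)
        = (if i = hakk - 2 then 8 else if i = hakk - 3 then 9 else 10) by split_ifs <;> omega,
      show (if hakk - 1 - i = 1 then (9 : Nat) else 10)
        = (if i = hakk - 2 then 9 else 10) by split_ifs <;> omega]

-- the states after t iterations of each outer loop
def loopA (hakk : Int) : Nat → List Int
  | 0 => List.replicate 10 1
  | t + 1 => stepA hakk (t : Int) (loopA hakk t)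

def loopB (hakk : Int) : Nat → List Int
  | 0 => List.replicate 10 1
  | t + 1 => stepSlide (hakk - 1 - (t : Int)) (loopB hakk t)

theorem length_stepA (hakk i : Int) (ks : List Int) :
    ((stepA hakk i ks).length : Int)
    = if i = hakk - 2 then 8 else if i = hakk - 3 then 9 else 10 := by
  simp only [stepA]
  rw [PySem.List.foldl_append_singleton_eq_map, List.nil_append, List.length_map,
      PySem.List.length_pyRange_one]
  split_ifs <;> simp

-- length of the state after t > 0 iterations (10 initially)
def lenAfter (hakk : Int) (t : Nat) : Int :=
  if t = 0 then 10 else if (t : Int) = hakk - 1 then 8 else if (t : Int) = hakk - 2 then 9 else 10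

theorem loop_inv (hakk : Int) (t : Nat) (ht : (t : Int) ≤ hakk - 1) :
    loopA hakk t = loopB hakk t ∧ ((loopA hakk t).length : Int) = lenAfter hakk t := by
  induction t with
  | zero => simp [loopA, loopB, lenAfter]
  | succ t ih =>
    have ht' : (t : Int) ≤ hakk - 1 := by push_cast at ht ⊢; omega
    obtain ⟨heq, hlen⟩ := ih ht'
    have hP : (if (t : Int) = hakk - 2 then (9 : Int) else 10) ≤ ((loopA hakk t).length : Int) := by
      rw [hlen]; unfold lenAfter; split_ifs <;> push_cast at ht ⊢ <;> omega
    refine ⟨?_, ?_⟩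
    · show stepA hakk (t : Int) (loopA hakk t) = stepSlide (hakk - 1 - (t : Int)) (loopB hakk t)
      rw [← heq, stepA_eq_stepSlide hakk (t : Int) _ hP]
    · show ((stepA hakk (t : Int) (loopA hakk t)).length : Int) = _
      rw [length_stepA]
      unfold lenAfter
      split_ifs <;> push_cast at ht ⊢ <;> omega

-- A's outer fold is loopA
theorem foldA_eq (hakk : Int) (N : Nat) :
    (PySem.List.pyRange 0 (N : Int) 1).foldl (fun ks i => stepA hakk i ks) (List.replicate 10 1)
    = loopA hakk N := by
  induction N with
  | zero => rw [PySem.List.pyRange_one_eq_nil (by norm_num)]; rfl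
  | succ N ih =>
    rw [show ((N + 1 : Nat) : Int) = (N : Int) + 1 by push_cast; ring,
        PySem.List.pyRange_one_succ_right (by positivity), List.foldl_append, ih]
    rfl

-- B's countdown fold, started after t iterations with s values left, finishes at loopB (t+s)
theorem foldB_aux (hakk : Int) (s : Nat) : ∀ t : Nat, (s : Int) + t = hakk - 1 →
    (PySem.List.pyRange (s : Int) 0 (-1)).foldl (fun v step => stepSlide step v) (loopB hakk t)
    = loopB hakk (t + s) := by
  induction s with
  | zero => intro t _; rw [PySem.List.pyRange_neg_one_eq_nil (by norm_num)]; rfl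
  | succ s ih =>
    intro t h
    rw [PySem.List.pyRange_neg_one_cons (by positivity), List.foldl_cons,
        show ((s + 1 : Nat) : Int) - 1 = (s : Int) by push_cast; ring,
        show stepSlide ((s + 1 : Nat) : Int) (loopB hakk t) = loopB hakk (t + 1) by
          show _ = stepSlide (hakk - 1 - (t : Int)) (loopB hakk t)
          congr 1; push_cast at h ⊢; omega,
        ih (t + 1) (by push_cast at h ⊢; omega), show t + 1 + s = t + (s + 1) by omega]

-- ===== VERDICT (by name: the statement is the Claim_ definition above) =====
theorem finn_antall_kombinasjoner_spec : Claim_equal_finn_antall_kombinasjoner := by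
  intro hakk _
  unfold Spec_finn_antall_kombinasjoner finn_antall_kombinasjoner finn_antall_kombinasjoner_alt
  by_cases h0 : hakk = 0
  · simp [h0]
  by_cases h1 : hakk = 1
  · simp [h1]
  simp only [if_neg h0, if_neg h1]
  by_cases hneg : hakk - 1 ≤ 0
  · rw [PySem.List.pyRange_one_eq_nil hneg, PySem.List.pyRange_neg_one_eq_nil hneg]
    rfl
  · have hN : hakk - 1 = (((hakk - 1).toNat : Nat) : Int) := by omega
    rw [hN, foldA_eq hakk (hakk - 1).toNat,
        show (List.replicate 10 1 : List Int) = loopB hakk 0 from rfl,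
        foldB_aux hakk (hakk - 1).toNat 0 (by omega), Nat.zero_add,
        (loop_inv hakk (hakk - 1).toNat (by omega)).1]
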